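-- pv_equiv track=rewrite | github.com/Math-dna/nbg | nbg.py | countStrike
-- ===== SOURCE A (Python) =====
-- def countStrike(myAns, Ans):
--     assert len(myAns) == len(Ans), 'Len Error' # 자릿수가 난이도와 같지 않다면
--     L = len(Ans)
--     s = 0
--     for i in range(L):
--         for j in range(L):
--             if (i == j) and (myAns[i] == Ans[j]): s += 1
--     return s
-- ===== SOURCE B (Python) =====
-- def countStrike(myAns, Ans):
--     assert len(myAns) == len(Ans), 'Len Error'
--     return sum(a == b for a, b in zip(myAns, Ans))
-- ===== Notes on version B (the rewrite author's own statement) =====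
-- stated objective: faster
-- what changed: Replaces the quadratic double loop (which only counts on the diagonal i==j) with a single pass over zip(myAns, Ans) summing positional matches.
import Mathlib
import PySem

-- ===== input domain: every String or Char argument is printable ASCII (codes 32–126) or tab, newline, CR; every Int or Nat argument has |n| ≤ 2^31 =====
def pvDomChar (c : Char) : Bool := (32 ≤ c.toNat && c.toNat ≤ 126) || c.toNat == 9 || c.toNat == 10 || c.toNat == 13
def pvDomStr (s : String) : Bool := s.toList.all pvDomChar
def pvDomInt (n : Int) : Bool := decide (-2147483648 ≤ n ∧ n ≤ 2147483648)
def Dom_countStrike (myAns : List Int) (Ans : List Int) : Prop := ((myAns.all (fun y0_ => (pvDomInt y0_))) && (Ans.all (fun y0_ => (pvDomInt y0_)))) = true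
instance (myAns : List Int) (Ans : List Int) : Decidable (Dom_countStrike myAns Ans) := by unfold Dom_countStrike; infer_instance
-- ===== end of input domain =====

-- B replaces A's quadratic double loop (which only counts on the diagonal i == j)
-- with a single pass over zip(myAns, Ans) summing positional matches.

-- ===== PORT A =====
def countStrike (myAns : List Int) (Ans : List Int) : Int :=
  let L : Int := Ans.length
  (PySem.List.pyRange 0 L 1).foldl (fun s i =>
    (PySem.List.pyRange 0 L 1).foldl (fun s j =>
      if i == j && (PySem.List.pyGet? myAns i == PySem.List.pyGet? Ans j) then s + 1 else s) s) 0

-- ===== PORT B =====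
def countStrike_alt (myAns : List Int) (Ans : List Int) : Int :=
  (myAns.zip Ans).foldl (fun s p => s + (if p.1 == p.2 then 1 else 0)) 0

-- ===== PRECONDITION & SPEC =====
-- A's assert raises AssertionError when the two lists differ in length.
def Pre_countStrike (myAns : List Int) (Ans : List Int) : Prop := myAns.length = Ans.length
instance (myAns : List Int) (Ans : List Int) : Decidable (Pre_countStrike myAns Ans) := by
  unfold Pre_countStrike; infer_instance
def pvWitness_countStrike : List Int × List Int := ([1, 2, 3], [1, 0, 3])

def Spec_countStrike (myAns : List Int) (Ans : List Int) (out : Int) : Prop := out = countStrike_alt myAns Ans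
instance (myAns : List Int) (Ans : List Int) (out : Int) : Decidable (Spec_countStrike myAns Ans out) := by unfold Spec_countStrike; infer_instance

-- ===== CLAIM (what is proved, stated in full; the proofs are below) =====
def Claim_equal_countStrike : Prop := ∀ (myAns : List Int) (Ans : List Int), Dom_countStrike myAns Ans → Pre_countStrike myAns Ans → Spec_countStrike myAns Ans (countStrike myAns Ans)

-- ===== LEMMAS AND PROOFS =====

-- countP of a predicate that can only fire at j = i, over a duplicate-free list
lemma countP_eq_diag (q : Int → Bool) (i : Int) :
    ∀ (l : List Int), l.Nodup →
      l.countP (fun j => i == j && q j) = (if i ∈ l ∧ q i then 1 else 0) := by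
  intro l hl
  induction l with
  | nil => simp
  | cons a l ih =>
    rw [List.countP_cons]
    rcases List.nodup_cons.mp hl with ⟨ha, hl'⟩
    by_cases hia : i = a
    · subst hia
      have : l.countP (fun j => i == j && q j) = 0 := by
        rw [List.countP_eq_zero]
        intro j hj
        simp only [Bool.and_eq_true, beq_iff_eq]
        rintro ⟨rfl, -⟩; exact ha hj
      rw [this]
      by_cases hq : q i = true <;> simp [hq]
    · have hne : (i == a && q a) = false := by
        simp [beq_iff_eq, hia]
      rw [hne, ih hl']
      simp [hia]

-- the inner j-loop adds 1 exactly when i is in the range and the diagonal entries match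
lemma inner_loop (myAns Ans : List Int) (L i s : Int) :
    (PySem.List.pyRange 0 L 1).foldl (fun s j =>
        if i == j && (PySem.List.pyGet? myAns i == PySem.List.pyGet? Ans j) then s + 1 else s) s
      = s + (if i ∈ PySem.List.pyRange 0 L 1 ∧
               (PySem.List.pyGet? myAns i == PySem.List.pyGet? Ans i) then 1 else 0) := by
  rw [PySem.List.foldl_count_if, countP_eq_diag _ _ _ (PySem.List.nodup_pyRange_one 0 L)]
  split_ifs <;> simp

-- A's nested loops count the diagonal matches over range(L)
lemma countStrike_eq_countP (myAns Ans : List Int) :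
    countStrike myAns Ans
      = ((PySem.List.pyRange 0 (Ans.length : Int) 1).countP
          (fun i => PySem.List.pyGet? myAns i == PySem.List.pyGet? Ans i) : Int) := by
  unfold countStrike
  rw [PySem.List.foldl_congr_mem _ _
        (fun s i => s + (if (PySem.List.pyGet? myAns i == PySem.List.pyGet? Ans i) then 1 else 0)) 0
        (by
          intro acc x hx
          rw [inner_loop]
          simp [hx])]
  rw [PySem.List.foldl_add, PySem.List.sum_map_ite_one_zero]
  simp

-- diagonal count over range(len) equals the match count of the zip
lemma range_countP_eq_zip (xs : List Int) :
    ∀ (ys : List Int), xs.length = ys.length →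
      (List.range ys.length).countP (fun k => xs[k]? == ys[k]?)
        = (xs.zip ys).countP (fun p => p.1 == p.2) := by
  induction xs with
  | nil =>
    intro ys h
    simp [(List.length_eq_zero_iff).mp h.symm]
  | cons x xs ih =>
    intro ys h
    cases ys with
    | nil => simp at h
    | cons y ys =>
      rw [List.length_cons, List.range_succ_eq_map, List.countP_cons, List.countP_map]
      have h' : xs.length = ys.length := by simpa using h
      have : (List.range ys.length).countP
          ((fun k => (x :: xs)[k]? == (y :: ys)[k]?) ∘ Nat.succ)
          = (xs.zip ys).countP (fun p => p.1 == p.2) := by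
        rw [← ih ys h']
        apply List.countP_congr
        intro k _
        simp [Function.comp]
      rw [this, List.zip_cons_cons, List.countP_cons]
      simp [Nat.add_comm]

theorem countStrike_spec' (myAns Ans : List Int) (h : myAns.length = Ans.length) :
    countStrike myAns Ans = countStrike_alt myAns Ans := by
  rw [countStrike_eq_countP]
  unfold countStrike_alt
  rw [PySem.List.foldl_add, PySem.List.sum_map_ite_one_zero]
  rw [PySem.List.pyRange_one, List.countP_map]
  have hlen : ((Ans.length : Int) - 0).toNat = Ans.length := by omega
  rw [hlen, ← range_countP_eq_zip myAns Ans h]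
  have hc : List.countP
      ((fun i => PySem.List.pyGet? myAns i == PySem.List.pyGet? Ans i) ∘ fun k : Nat => 0 + (k : Int))
      (List.range Ans.length)
      = List.countP (fun k => myAns[k]? == Ans[k]?) (List.range Ans.length) := by
    apply List.countP_congr
    intro k _
    simp [Function.comp, PySem.List.pyGet?_natCast]
  rw [hc]
  simp

-- ===== VERDICT (by name: the statement is the Claim_ definition above) =====
theorem countStrike_spec : Claim_equal_countStrike := by
  intro myAns Ans _ hpre
  unfold Spec_countStrike
  exact countStrike_spec' myAns Ans hpre
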